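-- pv_equiv track=rewrite | github.com/nicoaspra/240624_indexing_plate_calculator | index_plate_calculator.py | find_smallest_divisible_hole
-- ===== SOURCE A (Python) =====
-- indexing_plates = {
--     'Plate 1': [15, 16, 17, 18, 19, 20],
--     'Plate 2': [21, 23, 27, 29, 31, 33],
--     'Plate 3': [37, 39, 41, 43, 47, 49]
-- }
--
-- def find_smallest_divisible_hole(denominator):
--     smallest_hole = None
--     smallest_plate = None
--     for plate, holes in indexing_plates.items():
--         for hole in holes:
--             if hole % denominator == 0:
--                 if smallest_hole is None or hole < smallest_hole:
--                     smallest_hole = hole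
--                     smallest_plate = plate
--     return smallest_plate, smallest_hole
-- ===== SOURCE B (Python) =====
-- indexing_plates = {
--     'Plate 1': [15, 16, 17, 18, 19, 20],
--     'Plate 2': [21, 23, 27, 29, 31, 33],
--     'Plate 3': [37, 39, 41, 43, 47, 49]
-- }
--
-- def find_smallest_divisible_hole(denominator):
--     pairs = sorted(((hole, plate)
--                     for plate, holes in indexing_plates.items()
--                     for hole in holes), key=lambda p: p[0])
--     for hole, plate in pairs:
--         if hole % denominator == 0:
--             return plate, hole
--     return None, None
-- ===== Notes on version B (the rewrite author's own statement) =====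
-- stated objective: alternative
-- what changed: Replaces A's nested running-minimum scan over the plates dict with building a flat (hole, plate) list, sorting it by hole, and early-returning at the first divisible hole.
import Mathlib
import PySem

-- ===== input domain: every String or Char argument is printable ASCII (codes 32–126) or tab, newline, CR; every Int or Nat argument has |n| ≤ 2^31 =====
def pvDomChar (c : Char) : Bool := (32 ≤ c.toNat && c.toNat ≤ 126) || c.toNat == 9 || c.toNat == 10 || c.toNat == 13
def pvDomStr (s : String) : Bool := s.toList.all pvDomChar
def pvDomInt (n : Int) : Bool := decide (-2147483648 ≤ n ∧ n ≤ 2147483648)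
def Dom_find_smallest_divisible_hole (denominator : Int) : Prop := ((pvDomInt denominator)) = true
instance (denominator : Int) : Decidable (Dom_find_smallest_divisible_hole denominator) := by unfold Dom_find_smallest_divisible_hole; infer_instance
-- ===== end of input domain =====

-- B differs from A by a different decomposition (flatten + sort + early exit) of the same task; same cost on the fixed 18-hole table.

-- ===== PORT A =====
-- module-level dict indexing_plates, as an insertion-ordered association list
def indexing_plates : List (String × List Int) :=
  [("Plate 1", [15, 16, 17, 18, 19, 20]),
   ("Plate 2", [21, 23, 27, 29, 31, 33]),
   ("Plate 3", [37, 39, 41, 43, 47, 49])]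

-- A: nested for-loops keeping the running (smallest_plate, smallest_hole)
def find_smallest_divisible_hole (denominator : Int) : Option String × Option Int :=
  let st : Option Int × Option String :=
    indexing_plates.foldl (fun st ph =>
      ph.2.foldl (fun st hole =>
        if PySem.Int.mod hole denominator == 0 then
          if st.1.isNone || decide (hole < st.1.getD 0) then (some hole, some ph.1) else st
        else st) st) (none, none)
  (st.2, st.1)

-- ===== PORT B =====
-- B: for-loop with early return, over the sorted flat (hole, plate) list
def pv_scan (denominator : Int) : List (Int × String) → Option String × Option Int
  | [] => (none, none)
  | (hole, plate) :: rest =>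
      if PySem.Int.mod hole denominator == 0 then (some plate, some hole)
      else pv_scan denominator rest

def find_smallest_divisible_hole_alt (denominator : Int) : Option String × Option Int :=
  let pairs := PySem.List.sorted
    (indexing_plates.flatMap (fun pl => pl.2.map (fun hole => (hole, pl.1))))
    (fun p => p.1) false
  pv_scan denominator pairs

-- ===== PRECONDITION & SPEC =====
-- Pre_ excludes denominator = 0, where the Python A (and B) raise ZeroDivisionError.
def Pre_find_smallest_divisible_hole (denominator : Int) : Prop := denominator ≠ 0
instance (denominator : Int) : Decidable (Pre_find_smallest_divisible_hole denominator) := by unfold Pre_find_smallest_divisible_hole; infer_instance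
def pvWitness_find_smallest_divisible_hole : Int := 7

def Spec_find_smallest_divisible_hole (denominator : Int) (out : Option String × Option Int) : Prop := out = find_smallest_divisible_hole_alt denominator
instance (denominator : Int) (out : Option String × Option Int) : Decidable (Spec_find_smallest_divisible_hole denominator out) := by unfold Spec_find_smallest_divisible_hole; infer_instance

-- ===== CLAIM (what is proved, stated in full; the proofs are below) =====
def Claim_equal_find_smallest_divisible_hole : Prop := ∀ (denominator : Int), Dom_find_smallest_divisible_hole denominator → Pre_find_smallest_divisible_hole denominator → Spec_find_smallest_divisible_hole denominator (find_smallest_divisible_hole denominator)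

-- ===== LEMMAS AND PROOFS =====
-- A hole in [1,49] is not divisible by a denominator with |denominator| > 49.
theorem pv_mod_ne (denominator hole : Int) (hd : 49 < |denominator|)
    (h1 : 0 < hole) (h2 : hole ≤ 49) :
    PySem.Int.mod hole denominator ≠ 0 := by
  intro h
  have hdvd : denominator ∣ hole := (PySem.Int.mod_eq_zero_iff_dvd hole denominator).mp h
  have : |denominator| ≤ hole := Int.le_of_dvd h1 ((abs_dvd denominator hole).mpr hdvd)
  omega

-- Both ports return (none, none) when |denominator| > 49.
theorem pv_big (denominator : Int) (hd : 49 < |denominator|) :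
    find_smallest_divisible_hole denominator = (none, none) ∧
    find_smallest_divisible_hole_alt denominator = (none, none) := by
  have m15 : PySem.Int.mod 15 denominator ≠ 0 := pv_mod_ne denominator 15 hd (by norm_num) (by norm_num)
  have m16 : PySem.Int.mod 16 denominator ≠ 0 := pv_mod_ne denominator 16 hd (by norm_num) (by norm_num)
  have m17 : PySem.Int.mod 17 denominator ≠ 0 := pv_mod_ne denominator 17 hd (by norm_num) (by norm_num)
  have m18 : PySem.Int.mod 18 denominator ≠ 0 := pv_mod_ne denominator 18 hd (by norm_num) (by norm_num)
  have m19 : PySem.Int.mod 19 denominator ≠ 0 := pv_mod_ne denominator 19 hd (by norm_num) (by norm_num)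
  have m20 : PySem.Int.mod 20 denominator ≠ 0 := pv_mod_ne denominator 20 hd (by norm_num) (by norm_num)
  have m21 : PySem.Int.mod 21 denominator ≠ 0 := pv_mod_ne denominator 21 hd (by norm_num) (by norm_num)
  have m23 : PySem.Int.mod 23 denominator ≠ 0 := pv_mod_ne denominator 23 hd (by norm_num) (by norm_num)
  have m27 : PySem.Int.mod 27 denominator ≠ 0 := pv_mod_ne denominator 27 hd (by norm_num) (by norm_num)
  have m29 : PySem.Int.mod 29 denominator ≠ 0 := pv_mod_ne denominator 29 hd (by norm_num) (by norm_num)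
  have m31 : PySem.Int.mod 31 denominator ≠ 0 := pv_mod_ne denominator 31 hd (by norm_num) (by norm_num)
  have m33 : PySem.Int.mod 33 denominator ≠ 0 := pv_mod_ne denominator 33 hd (by norm_num) (by norm_num)
  have m37 : PySem.Int.mod 37 denominator ≠ 0 := pv_mod_ne denominator 37 hd (by norm_num) (by norm_num)
  have m39 : PySem.Int.mod 39 denominator ≠ 0 := pv_mod_ne denominator 39 hd (by norm_num) (by norm_num)
  have m41 : PySem.Int.mod 41 denominator ≠ 0 := pv_mod_ne denominator 41 hd (by norm_num) (by norm_num)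
  have m43 : PySem.Int.mod 43 denominator ≠ 0 := pv_mod_ne denominator 43 hd (by norm_num) (by norm_num)
  have m47 : PySem.Int.mod 47 denominator ≠ 0 := pv_mod_ne denominator 47 hd (by norm_num) (by norm_num)
  have m49 : PySem.Int.mod 49 denominator ≠ 0 := pv_mod_ne denominator 49 hd (by norm_num) (by norm_num)
  constructor <;>
    simp [find_smallest_divisible_hole, find_smallest_divisible_hole_alt, pv_scan,
      indexing_plates, PySem.List.sorted, PySem.List.insertBy, List.foldl, List.flatMap,
      m15, m16, m17, m18, m19, m20, m21, m23, m27, m29, m31, m33,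
      m37, m39, m41, m43, m47, m49]

-- ===== VERDICT (by name: the statement is the Claim_ definition above) =====
theorem find_smallest_divisible_hole_spec : Claim_equal_find_smallest_divisible_hole := by
  intro denominator _ hne
  unfold Spec_find_smallest_divisible_hole
  by_cases hbig : 49 < |denominator|
  · have h := pv_big denominator hbig
    rw [h.1, h.2]
  · obtain ⟨h1, h2⟩ := abs_le.mp (not_lt.mp hbig)
    interval_cases denominator <;> first | (exact absurd rfl hne) | decide
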